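-- pv_equiv track=rewrite | github.com/Uber-Career-Prep-2023/Uber-Career-Prep-Homework-Keshav-Shah | Assignment-1/ZeroSumSubArrays.py | ZeroSumSubArrays
-- ===== SOURCE A (Python) =====
-- def ZeroSumSubArrays(arr):
--     num_zero_subarrays = 0
--
--     # edge case if the array is empty
--     if len(arr) == 0:
--         return None
--
--     # edge case for the 0 element existing as a valid subarray is covered in this case
--     for i in range(len(arr)):
--         for j in range(i+1, len(arr)+1):
--             if(sum(arr[i:j]) == 0):
--                 num_zero_subarrays += 1
--     return num_zero_subarrays
-- ===== SOURCE B (Python) =====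
-- def ZeroSumSubArrays(arr):
--     if len(arr) == 0:
--         return None
--     counts = {0: 1}
--     prefix = 0
--     total = 0
--     for x in arr:
--         prefix += x
--         c = counts.get(prefix, 0)
--         total += c
--         counts[prefix] = c + 1
--     return total
-- ===== Notes on version B (the rewrite author's own statement) =====
-- stated objective: faster
-- what changed: Replaced the triple-nested enumeration of all subarray slices (re-summing each slice) by a single pass that maintains a running prefix sum and a hash map counting previous prefix-sum values.
import Mathlib
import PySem

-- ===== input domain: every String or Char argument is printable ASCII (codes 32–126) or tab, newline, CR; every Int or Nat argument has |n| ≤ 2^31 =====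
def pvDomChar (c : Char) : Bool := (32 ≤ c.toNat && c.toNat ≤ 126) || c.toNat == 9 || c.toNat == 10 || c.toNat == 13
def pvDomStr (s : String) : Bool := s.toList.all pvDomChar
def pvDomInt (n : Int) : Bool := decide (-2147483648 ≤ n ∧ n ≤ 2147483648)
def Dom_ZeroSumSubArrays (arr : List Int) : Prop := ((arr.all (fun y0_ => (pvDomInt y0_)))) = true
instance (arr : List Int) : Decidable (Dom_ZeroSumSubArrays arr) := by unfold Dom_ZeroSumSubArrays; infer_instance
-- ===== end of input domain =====

-- B replaces A's cubic enumeration of all slices (re-summing each) by a single linear pass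
-- counting equal prefix sums with a hash map (objective: faster, asymptotic).


-- ===== PORT A =====
-- literal transliteration of A: empty check, then for i in range(n): for j in range(i+1, n+1): if sum(arr[i:j]) == 0: count += 1
def ZeroSumSubArrays (arr : List Int) : Option Int :=
  if arr.length = 0 then none
  else
    some ((PySem.List.pyRange 0 (arr.length : Int) 1).foldl (fun acc i =>
      (PySem.List.pyRange (i + 1) ((arr.length : Int) + 1) 1).foldl (fun acc2 j =>
        if (PySem.List.slice arr (some i) (some j)).sum = 0 then acc2 + 1 else acc2) acc) 0)

-- ===== PORT B =====
-- literal transliteration of B: counts = {0:1}; prefix = 0; total = 0; one pass over arr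
def ZeroSumSubArrays_alt (arr : List Int) : Option Int :=
  if arr.length = 0 then none
  else
    let st := arr.foldl (fun (st : PySem.Dict Int Int × Int × Int) x =>
      let pfx := st.2.1 + x
      let c := st.1.getD pfx 0
      (st.1.insert pfx (c + 1), pfx, st.2.2 + c))
      ((PySem.Dict.empty).insert 0 1, 0, 0)
    some st.2.2

-- ===== PRECONDITION & SPEC =====
def Spec_ZeroSumSubArrays (arr : List Int) (out : Option Int) : Prop := out = ZeroSumSubArrays_alt arr
instance (arr : List Int) (out : Option Int) : Decidable (Spec_ZeroSumSubArrays arr out) := by unfold Spec_ZeroSumSubArrays; infer_instance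

-- ===== CLAIM (what is proved, stated in full; the proofs are below) =====
def Claim_equal_ZeroSumSubArrays : Prop := ∀ (arr : List Int), Dom_ZeroSumSubArrays arr → Spec_ZeroSumSubArrays arr (ZeroSumSubArrays arr)

-- ===== LEMMAS AND PROOFS =====

-- tail prefix sums of a list starting from accumulator p: [p+x1, p+x1+x2, …]
def pvTP (p : Int) : List Int → List Int
  | [] => []
  | x :: xs => (p + x) :: pvTP (p + x) xs

-- number of equal pairs, counted by first index
def pvPCA : List Int → Int
  | [] => 0
  | x :: xs => (xs.count x : Int) + pvPCA xs

-- number of equal pairs, counted by second index, with an initial multiset S of "seen" values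
def pvPCF (S : List Int) : List Int → Int
  | [] => 0
  | y :: ys => (S.count y : Int) + pvPCF (S ++ [y]) ys

lemma pvTP_eq (l : List Int) : ∀ p : Int,
    pvTP p l = (List.range l.length).map (fun k => p + (l.take (k + 1)).sum) := by
  induction l with
  | nil => intro p; simp [pvTP]
  | cons x xs ih =>
    intro p
    simp only [pvTP, List.length_cons, List.range_succ_eq_map, List.map_cons, List.map_map]
    congr 1
    · simp
    · rw [ih (p + x)]
      apply List.map_congr_left
      intro k _
      simp [List.take_succ_cons, add_assoc]

lemma pvTP_shift (l : List Int) : ∀ (c p : Int), pvTP (c + p) l = (pvTP p l).map (fun y => c + y) := by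
  induction l with
  | nil => intro c p; simp [pvTP]
  | cons x xs ih =>
    intro c p
    simp only [pvTP, List.map_cons, add_assoc]
    rw [ih c (p + x)]

lemma pvPCA_shift (l : List Int) (c : Int) : pvPCA (l.map (fun y => c + y)) = pvPCA l := by
  induction l with
  | nil => rfl
  | cons x xs ih =>
    simp only [List.map_cons, pvPCA, ih]
    rw [List.count_map_of_injective xs (fun y => c + y) (add_right_injective c)]

lemma count_singleton_int (y z : Int) : ((([y] : List Int).count z : Int)) = if y == z then (1 : Int) else 0 := by
  rw [List.count_cons, List.count_nil]
  cases y == z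
  · rfl
  · rfl

lemma count_eq_countP_int (y : Int) (l : List Int) : l.count y = l.countP (fun z => y == z) := by
  unfold List.count
  apply List.countP_congr
  intro z _
  rw [Bool.beq_comm]

lemma pvPCF_eq (L : List Int) : ∀ S : List Int,
    pvPCF S L = (L.map (fun y => (S.count y : Int))).sum + pvPCA L := by
  induction L with
  | nil => intro S; simp [pvPCF, pvPCA]
  | cons y ys ih =>
    intro S
    simp only [pvPCF, pvPCA, List.map_cons, List.sum_cons, ih (S ++ [y])]
    have h1 : (ys.map (fun z => (((S ++ [y]).count z : Nat) : Int))).sum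
        = (ys.map (fun z => (S.count z : Int))).sum
          + (ys.map (fun z => if y == z then (1 : Int) else 0)).sum := by
      rw [← List.sum_map_add]
      apply congrArg
      apply List.map_congr_left
      intro z _
      rw [List.count_append]
      push_cast
      rw [count_singleton_int]
    have h2 : (ys.map (fun z => if y == z then (1 : Int) else 0)).sum = (ys.count y : Int) := by
      rw [PySem.List.sum_map_ite_one_zero, count_eq_countP_int]
    rw [h1, h2]; ring

lemma pvPCF_zero (L : List Int) : pvPCF [0] L = pvPCA (0 :: L) := by
  rw [pvPCF_eq]
  simp only [pvPCA]
  have h : (L.map (fun y => (([0] : List Int).count y : Int))).sum = (L.count 0 : Int) := by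
    have h1 : (L.map (fun y => (([0] : List Int).count y : Int))).sum
        = (L.map (fun y => if (0 : Int) == y then (1 : Int) else 0)).sum := by
      apply congrArg; apply List.map_congr_left; intro z _
      exact count_singleton_int 0 z
    rw [h1, PySem.List.sum_map_ite_one_zero, count_eq_countP_int]
  rw [h]

-- ===== characterisation of port A =====

def pvInner (arr : List Int) (i : Int) : Int :=
  (((PySem.List.pyRange (i + 1) ((arr.length : Int) + 1) 1).countP
    (fun j => (PySem.List.slice arr (some i) (some j)).sum == 0) : Nat) : Int)

def pvOuter (arr : List Int) : Int :=
  ((PySem.List.pyRange 0 (arr.length : Int) 1).map (fun i => pvInner arr i)).sum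

lemma portA_eq_outer (arr : List Int) (h : arr.length ≠ 0) :
    ZeroSumSubArrays arr = some (pvOuter arr) := by
  unfold ZeroSumSubArrays
  rw [if_neg h]
  congr 1
  have hstep : (fun (acc : Int) (i : Int) =>
      (PySem.List.pyRange (i + 1) ((arr.length : Int) + 1) 1).foldl (fun acc2 j =>
        if (PySem.List.slice arr (some i) (some j)).sum = 0 then acc2 + 1 else acc2) acc)
      = (fun acc i => acc + pvInner arr i) := by
    funext acc i
    have hb : (fun (acc2 : Int) (j : Int) =>
        if (PySem.List.slice arr (some i) (some j)).sum = 0 then acc2 + 1 else acc2)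
        = (fun acc2 j =>
        if ((PySem.List.slice arr (some i) (some j)).sum == 0) = true then acc2 + 1 else acc2) := by
      funext acc2 j
      simp
    rw [hb, PySem.List.foldl_count_if]
    simp only [pvInner]
  rw [hstep, PySem.List.foldl_add]
  simp [pvOuter]

lemma pvInner_as_range (arr : List Int) (a : Nat) :
    pvInner arr ((a : Nat) : Int) = (((List.range (arr.length - a)).countP
      (fun m => ((arr.drop a).take (m + 1)).sum == 0) : Nat) : Int) := by
  unfold pvInner
  rw [PySem.List.pyRange_one]
  have h1 : (((arr.length : Int) + 1) - (((a : Nat) : Int) + 1)).toNat = arr.length - a := by omega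
  rw [h1, List.countP_map]
  congr 1
  apply List.countP_congr
  intro m _
  simp only [Function.comp_def]
  have h2 : (((a : Nat) : Int) + 1 + (m : Int)) = (((a + 1 + m : Nat) : Nat) : Int) := by push_cast; ring
  rw [h2, PySem.List.slice_natCast arr a (a + 1 + m)]
  have h3 : a + 1 + m - a = m + 1 := by omega
  rw [h3]

lemma pvOuter_as_range (arr : List Int) :
    pvOuter arr = ((List.range arr.length).map (fun k => pvInner arr ((k : Nat) : Int))).sum := by
  unfold pvOuter
  rw [PySem.List.pyRange_one]
  have h1 : (((arr.length : Int)) - 0).toNat = arr.length := by omega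
  rw [h1, List.map_map]
  apply congrArg
  apply List.map_congr_left
  intro k _
  simp only [Function.comp_def, zero_add]

lemma pvInner_zero (x : Int) (xs : List Int) :
    pvInner (x :: xs) (((0 : Nat) : Int)) = ((pvTP 0 (x :: xs)).count 0 : Int) := by
  rw [pvInner_as_range, pvTP_eq]
  simp only [List.drop_zero, Nat.sub_zero]
  congr 1
  rw [count_eq_countP_int, List.countP_map]
  apply List.countP_congr
  intro m _
  simp only [Function.comp_def, zero_add]
  rw [Bool.beq_comm]

lemma pvInner_succ (x : Int) (xs : List Int) (k : Nat) :
    pvInner (x :: xs) (((k + 1 : Nat) : Int)) = pvInner xs ((k : Nat) : Int) := by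
  rw [pvInner_as_range, pvInner_as_range]
  simp only [List.length_cons, List.drop_succ_cons, Nat.add_sub_add_right]

lemma pvOuter_char (arr : List Int) : pvOuter arr = pvPCA (0 :: pvTP 0 arr) := by
  induction arr with
  | nil => simp [pvOuter, pvTP, pvPCA]
  | cons x xs ih =>
    rw [pvOuter_as_range]
    simp only [List.length_cons, List.range_succ_eq_map, List.map_cons, List.map_map,
      List.sum_cons]
    have hrest : ((List.range xs.length).map
        ((fun k => pvInner (x :: xs) ((k : Nat) : Int)) ∘ Nat.succ)).sum = pvOuter xs := by
      rw [pvOuter_as_range]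
      apply congrArg
      apply List.map_congr_left
      intro k _
      simp only [Function.comp_def, Nat.succ_eq_add_one]
      exact pvInner_succ x xs k
    rw [hrest, ih, pvInner_zero]
    have h2 : pvPCA (0 :: pvTP 0 (x :: xs))
        = ((pvTP 0 (x :: xs)).count 0 : Int) + pvPCA (pvTP 0 (x :: xs)) := rfl
    rw [h2]
    have h3 : pvPCA (pvTP 0 (x :: xs)) = pvPCA (0 :: pvTP 0 xs) := by
      have hT : pvTP 0 (x :: xs) = (0 :: pvTP 0 xs).map (fun y => x + y) := by
        simp only [pvTP, List.map_cons, add_zero]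
        have h := pvTP_shift xs x 0
        simpa using h
      rw [hT, pvPCA_shift]
    rw [h3]

-- ===== characterisation of port B =====

lemma portB_loop (l : List Int) : ∀ (S : List Int) (p t : Int),
    (l.foldl (fun (st : PySem.Dict Int Int × Int × Int) x =>
      (st.1.insert (st.2.1 + x) (st.1.getD (st.2.1 + x) 0 + 1), st.2.1 + x,
        st.2.2 + st.1.getD (st.2.1 + x) 0))
      (PySem.Dict.counter S, p, t)).2.2 = t + pvPCF S (pvTP p l) := by
  induction l with
  | nil => intro S p t; simp [pvTP, pvPCF]
  | cons x xs ih =>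
    intro S p t
    simp only [List.foldl_cons]
    have hd : (PySem.Dict.counter S).insert (p + x) ((PySem.Dict.counter S).getD (p + x) 0 + 1)
        = PySem.Dict.counter (S ++ [p + x]) := by
      rw [← PySem.Dict.foldl_insert_getD_add_one_eq_counter,
          ← PySem.Dict.foldl_insert_getD_add_one_eq_counter, List.foldl_append]
      rfl
    rw [hd, ih (S ++ [p + x]) (p + x) (t + (PySem.Dict.counter S).getD (p + x) 0)]
    simp only [pvTP, pvPCF, PySem.Dict.getD_counter]
    ring

lemma portB_eq (arr : List Int) (h : arr.length ≠ 0) :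
    ZeroSumSubArrays_alt arr = some (pvPCA (0 :: pvTP 0 arr)) := by
  unfold ZeroSumSubArrays_alt
  rw [if_neg h]
  have hinit : (PySem.Dict.empty : PySem.Dict Int Int).insert 0 1
      = PySem.Dict.counter [(0 : Int)] := by decide
  simp only [hinit]
  congr 1
  have := portB_loop arr [(0 : Int)] 0 0
  simp only [zero_add] at this
  rw [this, pvPCF_zero]

-- ===== VERDICT (by name: the statement is the Claim_ definition above) =====
theorem ZeroSumSubArrays_spec : Claim_equal_ZeroSumSubArrays := by
  intro arr _
  unfold Spec_ZeroSumSubArrays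
  by_cases h : arr.length = 0
  · unfold ZeroSumSubArrays ZeroSumSubArrays_alt
    rw [if_pos h, if_pos h]
  · rw [portA_eq_outer arr h, portB_eq arr h, pvOuter_char]
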